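-- pv_equiv track=rewrite | github.com/dcjwu/adminGUI-automation | app/google_sheets.py | _validate_column_values
-- ===== SOURCE A (Python) =====
-- def _validate_column_values(values: list):
--     is_empty = True
--     not_empty_values = []
--
--     for v in values:
--         if v == '':
--             is_empty = True
--         else:
--             is_empty = False
--             not_empty_values.append(v)
--
--     return is_empty, len(not_empty_values)
-- ===== SOURCE B (Python) =====
-- def _validate_column_values(values: list):
--     is_empty = values[-1] == '' if values else True
--     count = sum(1 for v in values if v != '')
--     return is_empty, count
-- ===== Notes on version B (the rewrite author's own statement) =====
-- stated objective: simpler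
-- what changed: Replaces the single stateful loop (flag + accumulator list) by two independent closed computations: is_empty is just the emptiness of the last element, and the count is a direct sum over non-empty values.
import Mathlib
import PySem

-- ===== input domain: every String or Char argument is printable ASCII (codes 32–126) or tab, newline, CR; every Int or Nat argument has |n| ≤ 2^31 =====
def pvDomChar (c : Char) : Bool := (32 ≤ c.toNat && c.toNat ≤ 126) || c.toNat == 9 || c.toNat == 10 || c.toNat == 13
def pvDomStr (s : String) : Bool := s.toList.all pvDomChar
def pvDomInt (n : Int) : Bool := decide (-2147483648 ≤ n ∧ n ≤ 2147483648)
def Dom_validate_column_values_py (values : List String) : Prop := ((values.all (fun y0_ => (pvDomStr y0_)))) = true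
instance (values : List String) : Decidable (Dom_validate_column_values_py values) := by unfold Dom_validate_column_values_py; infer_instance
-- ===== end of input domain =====

-- B computes is_empty as the last element's emptiness and the count as one direct sum, instead of A's single stateful loop; objective: simpler.

-- ===== PORT A =====
def validate_column_values_py (values : List String) : Bool × Int :=
  let st := values.foldl
    (fun (s : Bool × List String) v =>
      if v == "" then (true, s.2) else (false, s.2 ++ [v]))
    (true, [])
  (st.1, (st.2.length : Int))

-- ===== PORT B =====
def validate_column_values_py_alt (values : List String) : Bool × Int :=
  let is_empty := match values.getLast? with
    | none => true
    | some v => v == ""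
  let count : Int := ((values.filter (fun v => v != "")).length : Int)
  (is_empty, count)

-- ===== PRECONDITION & SPEC =====
def Spec_validate_column_values_py (values : List String) (out : Bool × Int) : Prop := out = validate_column_values_py_alt values
instance (values : List String) (out : Bool × Int) : Decidable (Spec_validate_column_values_py values out) := by unfold Spec_validate_column_values_py; infer_instance

-- ===== CLAIM (what is proved, stated in full; the proofs are below) =====
def Claim_equal_validate_column_values_py : Prop := ∀ (values : List String), Dom_validate_column_values_py values → Spec_validate_column_values_py values (validate_column_values_py values)

-- ===== LEMMAS AND PROOFS =====

theorem pv_fold_char (values : List String) : ∀ (b : Bool) (acc : List String),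
    values.foldl
      (fun (s : Bool × List String) v =>
        if v == "" then (true, s.2) else (false, s.2 ++ [v]))
      (b, acc)
    = ((match values.getLast? with
        | none => b
        | some v => v == ""),
       acc ++ values.filter (fun v => v != "")) := by
  induction values with
  | nil => intro b acc; simp
  | cons v vs ih =>
    intro b acc
    simp only [List.foldl_cons]
    by_cases hv : v = ""
    · subst hv
      rw [if_pos (by simp), ih]
      cases vs with
      | nil => simp
      | cons w ws =>
        cases h : (w :: ws).getLast? with
        | none => simp at h
        | some x => simp [h, List.filter]
    · rw [if_neg (by simpa using hv), ih]
      cases vs with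
      | nil => simp [hv]
      | cons w ws =>
        cases h : (w :: ws).getLast? with
        | none => simp at h
        | some x =>
          have hv' : (v != "") = true := by simp [hv]
          simp [h, List.filter, hv']

-- ===== VERDICT (by name: the statement is the Claim_ definition above) =====
theorem validate_column_values_py_spec : Claim_equal_validate_column_values_py := by
  intro values _
  unfold Spec_validate_column_values_py validate_column_values_py validate_column_values_py_alt
  rw [pv_fold_char]
  simp
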